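-- pv_equiv track=rewrite | github.com/jaytula/python-wars | simple_array_products.py | solve
-- ===== SOURCE A (Python) =====
-- from typing import List
--
-- def solve(arr: List[List[int]]):
--   result: List[int] = []
--   for item in arr:
--     new_result: List[int] = []
--
--     if len(result) == 0:
--       for subitem in item:
--         new_result.append(subitem)
--     else:
--       for result_item in result:
--         for subitem in item:
--           new_result.append(result_item * subitem)
--
--     result = new_result
--
--   return max(result)
-- ===== SOURCE B (Python) =====
-- def solve(arr):
--     mn, mx = min(arr[0]), max(arr[0])
--     for item in arr[1:]:
--         cands = [p * x for p in (mn, mx) for x in item]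
--         mn, mx = min(cands), max(cands)
--     return mx
-- ===== Notes on version B (the rewrite author's own statement) =====
-- stated objective: faster
-- what changed: Instead of materialising the full cross-product list of all per-sublist picks, B keeps only the running minimum and maximum product per processed sublist (the extremes of r*x for mn<=r<=mx are attained at r=mn or r=mx), one pass over the elements.
-- outside the precondition, e.g. on solve([[2], [], [3]]): A returns 3, B raises ValueError; on solve([]): A raises ValueError, B raises IndexError
import Mathlib
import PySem

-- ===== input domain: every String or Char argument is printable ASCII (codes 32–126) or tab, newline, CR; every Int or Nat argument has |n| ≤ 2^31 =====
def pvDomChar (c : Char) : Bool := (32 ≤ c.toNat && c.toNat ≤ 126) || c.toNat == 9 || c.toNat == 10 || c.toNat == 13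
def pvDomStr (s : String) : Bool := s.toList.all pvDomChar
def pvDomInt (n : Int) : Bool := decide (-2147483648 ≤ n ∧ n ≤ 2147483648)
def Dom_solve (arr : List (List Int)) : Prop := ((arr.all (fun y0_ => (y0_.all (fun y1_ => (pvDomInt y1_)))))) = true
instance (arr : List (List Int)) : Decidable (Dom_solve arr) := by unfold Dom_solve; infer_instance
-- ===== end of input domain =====

-- B replaces the exponential cross-product list with a running (min, max) product pair per sublist (asymptotically faster).

-- ===== PORT A =====
-- loop body of A's 'for item in arr', state = result
def solveStepA (result item : List Int) : List Int :=
  if result.length = 0 then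
    item.foldl (fun nr s => nr ++ [s]) []
  else
    result.foldl (fun nr r => item.foldl (fun nr2 s => nr2 ++ [r * s]) nr) []

def solve (arr : List (List Int)) : Int :=
  let result := arr.foldl solveStepA []
  (PySem.List.max? result (fun x => x)).getD 0  -- Pre_solve guarantees result ≠ [], so max(result) returns

-- ===== PORT B =====
-- loop body of B's 'for item in arr[1:]', state = (mn, mx)
def solveStepB (p : Int × Int) (item : List Int) : Int × Int :=
  let cands := [p.1, p.2].flatMap (fun q => item.map (fun x => q * x))
  ((PySem.List.min? cands (fun x => x)).getD 0, (PySem.List.max? cands (fun x => x)).getD 0)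

def solve_alt (arr : List (List Int)) : Int :=
  match arr with
  | [] => 0  -- B raises IndexError here; excluded by Pre_solve
  | first :: rest =>
    let mn := (PySem.List.min? first (fun x => x)).getD 0
    let mx := (PySem.List.max? first (fun x => x)).getD 0
    (rest.foldl solveStepB (mn, mx)).2

-- ===== PRECONDITION & SPEC =====
-- Pre_ excludes the empty list (A's max([]) raises ValueError) and lists containing an empty
-- sublist: if the empty sublist is last A raises, and otherwise A's returned value (it silently
-- restarts the product after the empty sublist) is an accident on which B itself raises ValueError.
def Pre_solve (arr : List (List Int)) : Prop := arr ≠ [] ∧ ∀ item ∈ arr, item ≠ []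
instance (arr : List (List Int)) : Decidable (Pre_solve arr) := by unfold Pre_solve; infer_instance
def pvWitness_solve : List (List Int) := [[2, -3], [4, 5], [-1]]
def Spec_solve (arr : List (List Int)) (out : Int) : Prop := out = solve_alt arr
instance (arr : List (List Int)) (out : Int) : Decidable (Spec_solve arr out) := by unfold Spec_solve; infer_instance

-- ===== CLAIM (what is proved, stated in full; the proofs are below) =====
def Claim_equal_solve : Prop := ∀ (arr : List (List Int)), Dom_solve arr → Pre_solve arr → Spec_solve arr (solve arr)

-- ===== LEMMAS AND PROOFS =====

lemma flatten_map_singleton (f : Int → Int) (l : List Int) :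
    (l.map (fun x => [f x])).flatten = l.map f := by
  induction l with
  | nil => rfl
  | cons x t ih => simp [ih]

-- A's innermost loop appends f of each element
lemma foldl_append_singleton (f : Int → Int) (l : List Int) (nr : List Int) :
    l.foldl (fun a x => a ++ [f x]) nr = nr ++ l.map f := by
  induction l generalizing nr with
  | nil => simp
  | cons x t ih => simp [List.foldl, ih]


lemma stepA_of_ne (result item : List Int) (h : result ≠ []) :
    solveStepA result item = result.flatMap (fun r => item.map (fun s => r * s)) := by
  have : result.length ≠ 0 := by simpa using h
  simp [solveStepA, this, List.flatMap, flatten_map_singleton]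

lemma stepA_nil (item : List Int) :
    solveStepA [] item = item := by
  simp [solveStepA, foldl_append_singleton (f := fun x => x), List.map_id']

-- each product r*x with mn ≤ r ≤ mx lies between mn*x, mx*x
lemma mul_between (mn r mx x : Int) (h1 : mn ≤ r) (h2 : r ≤ mx) :
    (min (mn * x) (mx * x) ≤ r * x) ∧ (r * x ≤ max (mn * x) (mx * x)) := by
  rcases le_total 0 x with hx | hx
  · constructor
    · exact le_trans (min_le_left _ _) (mul_le_mul_of_nonneg_right h1 hx)
    · exact le_trans (mul_le_mul_of_nonneg_right h2 hx) (le_max_right _ _)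
  · constructor
    · exact le_trans (min_le_right _ _) (mul_le_mul_of_nonpos_right h2 hx)
    · exact le_trans (mul_le_mul_of_nonpos_right h1 hx) (le_max_left _ _)

-- the core step: extremes of the full product list = extremes of B's candidate list
lemma mem_new (result item : List Int) (r x : Int) (hr : r ∈ result) (hx : x ∈ item) :
    r * x ∈ result.flatMap (fun r => item.map (fun s => r * s)) := by
  rw [List.mem_flatMap]
  exact ⟨r, hr, List.mem_map.mpr ⟨x, hx, rfl⟩⟩

lemma step_extremes (result item : List Int) (mn mx : Int)
    (hi : item ≠ [])
    (hmn : PySem.List.min? result (fun x => x) = some mn)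
    (hmx : PySem.List.max? result (fun x => x) = some mx) :
    PySem.List.min? (result.flatMap (fun r => item.map (fun s => r * s))) (fun x => x)
      = PySem.List.min? ([mn, mx].flatMap (fun q => item.map (fun x => q * x))) (fun x => x)
    ∧ PySem.List.max? (result.flatMap (fun r => item.map (fun s => r * s))) (fun x => x)
      = PySem.List.max? ([mn, mx].flatMap (fun q => item.map (fun x => q * x))) (fun x => x) := by
  have hmnR : mn ∈ result := PySem.List.min?_mem hmn
  have hmxR : mx ∈ result := PySem.List.max?_mem hmx
  obtain ⟨x0, hx0⟩ : ∃ x, x ∈ item := by cases item with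
    | nil => exact absurd rfl hi
    | cons a t => exact ⟨a, List.mem_cons_self⟩
  have hnewne : result.flatMap (fun r => item.map (fun s => r * s)) ≠ [] :=
    List.ne_nil_of_mem (mem_new result item mn x0 hmnR hx0)
  have hcandsne : [mn, mx].flatMap (fun q => item.map (fun x => q * x)) ≠ [] :=
    List.ne_nil_of_mem (mem_new [mn, mx] item mn x0 List.mem_cons_self hx0)
  -- names for the four extremal values
  obtain ⟨m1, hm1⟩ : ∃ v, PySem.List.min? (result.flatMap (fun r => item.map (fun s => r * s))) (fun x => x) = some v := by
    cases h : PySem.List.min? (result.flatMap (fun r => item.map (fun s => r * s))) (fun x => x) with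
    | none => exact absurd (((PySem.List.min?_eq_none_iff _ _).mp h)) hnewne
    | some v => exact ⟨v, rfl⟩
  obtain ⟨M1, hM1⟩ : ∃ v, PySem.List.max? (result.flatMap (fun r => item.map (fun s => r * s))) (fun x => x) = some v := by
    cases h : PySem.List.max? (result.flatMap (fun r => item.map (fun s => r * s))) (fun x => x) with
    | none => exact absurd (((PySem.List.max?_eq_none_iff _ _).mp h)) hnewne
    | some v => exact ⟨v, rfl⟩
  obtain ⟨m2, hm2⟩ : ∃ v, PySem.List.min? ([mn, mx].flatMap (fun q => item.map (fun x => q * x))) (fun x => x) = some v := by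
    cases h : PySem.List.min? ([mn, mx].flatMap (fun q => item.map (fun x => q * x))) (fun x => x) with
    | none => exact absurd (((PySem.List.min?_eq_none_iff _ _).mp h)) hcandsne
    | some v => exact ⟨v, rfl⟩
  obtain ⟨M2, hM2⟩ : ∃ v, PySem.List.max? ([mn, mx].flatMap (fun q => item.map (fun x => q * x))) (fun x => x) = some v := by
    cases h : PySem.List.max? ([mn, mx].flatMap (fun q => item.map (fun x => q * x))) (fun x => x) with
    | none => exact absurd (((PySem.List.max?_eq_none_iff _ _).mp h)) hcandsne
    | some v => exact ⟨v, rfl⟩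
  -- cands ⊆ new
  have hsub : ∀ y ∈ [mn, mx].flatMap (fun q => item.map (fun x => q * x)),
      y ∈ result.flatMap (fun r => item.map (fun s => r * s)) := by
    intro y hy
    rw [List.mem_flatMap] at hy
    obtain ⟨q, hq, hy2⟩ := hy
    obtain ⟨x, hx, rfl⟩ := List.mem_map.mp hy2
    have hqR : q ∈ result := by
      rcases List.mem_cons.mp hq with h | h
      · subst h; exact hmnR
      · have h2 : q = mx := by simpa using h
        subst h2; exact hmxR
    exact mem_new result item q x hqR hx
  -- every element of new is bounded by elements of cands
  have hbound : ∀ y ∈ result.flatMap (fun r => item.map (fun s => r * s)),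
      m2 ≤ y ∧ y ≤ M2 := by
    intro y hy
    rw [List.mem_flatMap] at hy
    obtain ⟨r, hrR, hy2⟩ := hy
    obtain ⟨x, hx, rfl⟩ := List.mem_map.mp hy2
    have h1 : mn ≤ r := by have := PySem.List.min?_isMin hmn r hrR; simpa using this
    have h2 : r ≤ mx := by have := PySem.List.max?_isMax hmx r hrR; simpa using this
    have hb := mul_between mn r mx x h1 h2
    have hmnx : mn * x ∈ [mn, mx].flatMap (fun q => item.map (fun x => q * x)) :=
      mem_new [mn, mx] item mn x List.mem_cons_self hx
    have hmxx : mx * x ∈ [mn, mx].flatMap (fun q => item.map (fun x => q * x)) :=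
      mem_new [mn, mx] item mx x (by simp) hx
    have l1 : m2 ≤ mn * x := by have := PySem.List.min?_isMin hm2 _ hmnx; simpa using this
    have l2 : m2 ≤ mx * x := by have := PySem.List.min?_isMin hm2 _ hmxx; simpa using this
    have u1 : mn * x ≤ M2 := by have := PySem.List.max?_isMax hM2 _ hmnx; simpa using this
    have u2 : mx * x ≤ M2 := by have := PySem.List.max?_isMax hM2 _ hmxx; simpa using this
    constructor
    · calc m2 ≤ min (mn * x) (mx * x) := le_min l1 l2
        _ ≤ r * x := hb.1
    · calc r * x ≤ max (mn * x) (mx * x) := hb.2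
        _ ≤ M2 := max_le u1 u2
  have e1 : m1 = m2 := by
    have a1 : m2 ≤ m1 := (hbound m1 (PySem.List.min?_mem hm1)).1
    have a2 : m1 ≤ m2 := by
      have := PySem.List.min?_isMin hm1 m2 (hsub m2 (PySem.List.min?_mem hm2)); simpa using this
    omega
  have e2 : M1 = M2 := by
    have a1 : M1 ≤ M2 := (hbound M1 (PySem.List.max?_mem hM1)).2
    have a2 : M2 ≤ M1 := by
      have := PySem.List.max?_isMax hM1 M2 (hsub M2 (PySem.List.max?_mem hM2)); simpa using this
    omega
  rw [hm1, hm2, hM1, hM2, e1, e2]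
  exact ⟨rfl, rfl⟩

-- main invariant: A's fold keeps the full product list; B keeps its (min, max)
lemma invariant (rest : List (List Int)) (result : List Int) (mn mx : Int)
    (hr : result ≠ []) (hrest : ∀ item ∈ rest, item ≠ [])
    (hmn : PySem.List.min? result (fun x => x) = some mn)
    (hmx : PySem.List.max? result (fun x => x) = some mx) :
    (PySem.List.max? (rest.foldl solveStepA result) (fun x => x)).getD 0
      = (rest.foldl solveStepB (mn, mx)).2 := by
  induction rest generalizing result mn mx with
  | nil => simp [hmx]
  | cons item t ih =>
    have hi : item ≠ [] := hrest item List.mem_cons_self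
    have ht : ∀ it ∈ t, it ≠ [] := fun it h => hrest it (List.mem_cons_of_mem _ h)
    obtain ⟨x0, hx0⟩ : ∃ x, x ∈ item := by cases item with
      | nil => exact absurd rfl hi
      | cons a s => exact ⟨a, List.mem_cons_self⟩
    have hmnR : mn ∈ result := PySem.List.min?_mem hmn
    have hnewne : result.flatMap (fun r => item.map (fun s => r * s)) ≠ [] :=
      List.ne_nil_of_mem (mem_new result item mn x0 hmnR hx0)
    obtain ⟨m1, hm1⟩ : ∃ v, PySem.List.min? (result.flatMap (fun r => item.map (fun s => r * s))) (fun x => x) = some v := by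
      cases h : PySem.List.min? (result.flatMap (fun r => item.map (fun s => r * s))) (fun x => x) with
      | none => exact absurd (((PySem.List.min?_eq_none_iff _ _).mp h)) hnewne
      | some v => exact ⟨v, rfl⟩
    obtain ⟨M1, hM1⟩ : ∃ v, PySem.List.max? (result.flatMap (fun r => item.map (fun s => r * s))) (fun x => x) = some v := by
      cases h : PySem.List.max? (result.flatMap (fun r => item.map (fun s => r * s))) (fun x => x) with
      | none => exact absurd (((PySem.List.max?_eq_none_iff _ _).mp h)) hnewne
      | some v => exact ⟨v, rfl⟩
    obtain ⟨hse1, hse2⟩ := step_extremes result item mn mx hi hmn hmx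
    have hstepB : solveStepB (mn, mx) item = (m1, M1) := by
      simp only [solveStepB]
      rw [← hse1, ← hse2, hm1, hM1]
      rfl
    calc (PySem.List.max? ((item :: t).foldl solveStepA result) (fun x => x)).getD 0
        = (PySem.List.max? (t.foldl solveStepA (result.flatMap (fun r => item.map (fun s => r * s)))) (fun x => x)).getD 0 := by
          rw [List.foldl_cons, stepA_of_ne result item hr]
      _ = (t.foldl solveStepB (m1, M1)).2 := ih _ m1 M1 hnewne ht hm1 hM1
      _ = ((item :: t).foldl solveStepB (mn, mx)).2 := by rw [List.foldl_cons, hstepB]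

-- ===== VERDICT (by name: the statement is the Claim_ definition above) =====
theorem solve_spec : Claim_equal_solve := by
  intro arr _ hpre
  unfold Spec_solve
  obtain ⟨hne, hall⟩ := hpre
  cases arr with
  | nil => exact absurd rfl hne
  | cons first rest =>
    have hf : first ≠ [] := hall first List.mem_cons_self
    obtain ⟨mn0, hmn0⟩ : ∃ v, PySem.List.min? first (fun x => x) = some v := by
      cases h : PySem.List.min? first (fun x => x) with
      | none => exact absurd (((PySem.List.min?_eq_none_iff _ _).mp h)) hf
      | some v => exact ⟨v, rfl⟩
    obtain ⟨mx0, hmx0⟩ : ∃ v, PySem.List.max? first (fun x => x) = some v := by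
      cases h : PySem.List.max? first (fun x => x) with
      | none => exact absurd (((PySem.List.max?_eq_none_iff _ _).mp h)) hf
      | some v => exact ⟨v, rfl⟩
    have hA : solve (first :: rest)
        = (PySem.List.max? (rest.foldl solveStepA first) (fun x => x)).getD 0 := by
      simp only [solve, List.foldl_cons, stepA_nil]
    have hB : solve_alt (first :: rest) = (rest.foldl solveStepB (mn0, mx0)).2 := by
      simp only [solve_alt, hmn0, hmx0, Option.getD_some]
    rw [hA, hB]
    exact invariant rest first mn0 mx0 hf (fun it h => hall it (List.mem_cons_of_mem _ h)) hmn0 hmx0
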